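-- pv_equiv track=rewrite | github.com/CaffeLatteIV/adventofcode2024 | day4/day4a.py | orizz
-- ===== SOURCE A (Python) =====
-- def orizz(data, xmas):
--     count = 0
--     for row in data:
--       i=0
--       for i in range(0, len(row)):
--         isXmas = True
--         j= i
--         for x in xmas:
--           if j >= len(row):
--             isXmas = False
--             break
--           char = row[j]
--           if char != x:
--               isXmas =False
--               break
--           else:
--             j+=1
--         if isXmas:
--           count+=1
--     return count
-- ===== SOURCE B (Python) =====
-- def orizz(data, xmas):
--     xm = list(xmas)
--     m = len(xm)
--     total = 0
--     for row in data:
--         t = list(row)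
--         while t:
--             if t[:m] == xm:
--                 total += 1
--             t = t[1:]
--     return total
-- ===== Notes on version B (the rewrite author's own statement) =====
-- stated objective: simpler
-- what changed: A tests each start index with an inner per-character loop over the pattern carrying a flag, pointer and bounds check; B walks the row's suffixes and counts those whose prefix slice equals the pattern, with no index arithmetic at all.
import Mathlib
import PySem

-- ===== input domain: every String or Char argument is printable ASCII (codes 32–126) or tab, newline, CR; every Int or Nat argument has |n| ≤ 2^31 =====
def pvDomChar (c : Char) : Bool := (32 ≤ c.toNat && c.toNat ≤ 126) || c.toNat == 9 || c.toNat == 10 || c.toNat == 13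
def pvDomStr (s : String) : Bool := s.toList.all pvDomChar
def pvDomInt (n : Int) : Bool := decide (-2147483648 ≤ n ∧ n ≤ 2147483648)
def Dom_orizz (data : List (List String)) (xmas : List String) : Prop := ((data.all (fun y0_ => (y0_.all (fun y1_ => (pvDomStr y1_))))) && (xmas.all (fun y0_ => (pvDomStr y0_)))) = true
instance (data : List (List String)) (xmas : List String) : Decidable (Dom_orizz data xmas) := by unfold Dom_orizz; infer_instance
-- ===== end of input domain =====

-- B walks the row's suffixes and counts those starting with the pattern (objective: simpler, no index arithmetic).

-- ===== PORT A =====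
-- inner 'for x in xmas' loop with its break/flag logic: returns the final isXmas
def orizzInner (row : List String) (j : Int) : List String → Bool
  | [] => true
  | x :: xs =>
    if j ≥ (row.length : Int) then false
    else
      match PySem.List.pyGet? row j with   -- row[j]; the guard above (with 0 ≤ j from range) keeps it in range
      | none => false                       -- unreachable for 0 ≤ j < len
      | some c => if c ≠ x then false else orizzInner row (j + 1) xs

def orizz (data : List (List String)) (xmas : List String) : Int :=
  data.foldl (fun count row =>
    (PySem.List.pyRange 0 (row.length : Int) 1).foldl
      (fun c i => if orizzInner row i xmas then c + 1 else c) count) 0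

-- ===== PORT B =====
-- while t: if t[:m] == xm: total += 1; t = t[1:]
def orizzTails (xm : List String) : List String → Int
  | [] => 0
  | a :: ts =>
    (if PySem.List.slice (a :: ts) none (some (xm.length : Int)) = xm then (1 : Int) else 0)
      + orizzTails xm ts

def orizz_alt (data : List (List String)) (xmas : List String) : Int :=
  data.foldl (fun total row => total + orizzTails xmas row) 0

-- ===== PRECONDITION & SPEC =====
def Spec_orizz (data : List (List String)) (xmas : List String) (out : Int) : Prop := out = orizz_alt data xmas
instance (data : List (List String)) (xmas : List String) (out : Int) : Decidable (Spec_orizz data xmas out) := by unfold Spec_orizz; infer_instance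

-- ===== CLAIM (what is proved, stated in full; the proofs are below) =====
def Claim_equal_orizz : Prop := ∀ (data : List (List String)) (xmas : List String), Dom_orizz data xmas → Spec_orizz data xmas (orizz data xmas)

-- ===== LEMMAS AND PROOFS =====

-- A's inner loop decides "xmas is a prefix of row from position j"
lemma orizzInner_eq_prefix (row : List String) (xm : List String) (j : Int) (hj : 0 ≤ j) :
    orizzInner row j xm = decide (xm <+: row.drop j.toNat) := by
  induction xm generalizing j with
  | nil => simp [orizzInner]
  | cons x xs ih =>
    by_cases h : j ≥ (row.length : Int)
    · have : row.drop j.toNat = [] := by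
        apply List.drop_eq_nil_of_le; omega
      simp [orizzInner, h, this]
    · have hlt : j.toNat < row.length := by omega
      have hget : PySem.List.pyGet? row j = some row[j.toNat] := by
        rw [PySem.List.pyGet?_of_nonneg row hj]
        simp [hlt]
      have hdrop : row.drop j.toNat = row[j.toNat] :: row.drop (j.toNat + 1) :=
        List.drop_eq_getElem_cons hlt
      have htn : (j + 1).toNat = j.toNat + 1 := by omega
      rw [orizzInner, if_neg h, hget]
      by_cases hc : row[j.toNat] = x
      · simp [hc, ih (j + 1) (by omega), htn, hdrop, List.cons_prefix_cons]
      · show (if row[j.toNat] ≠ x then false else orizzInner row (j + 1) xs) = _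
        rw [if_pos hc]
        have hnp : ¬ (x :: xs <+: List.drop j.toNat row) := by
          rw [hdrop, List.cons_prefix_cons]
          exact fun hh => hc hh.1.symm
        exact (decide_eq_false hnp).symm

-- B's slice test is the same prefix test
lemma orizzTails_cons (xm : List String) (a : String) (ts : List String) :
    orizzTails xm (a :: ts)
      = (if xm <+: (a :: ts) then (1 : Int) else 0) + orizzTails xm ts := by
  rw [orizzTails]
  congr 1
  rw [PySem.List.slice_to_natCast]
  by_cases h : xm <+: (a :: ts)
  · simp [h, List.prefix_iff_eq_take.mp h |>.symm]
  · simp only [h, if_false, ite_eq_right_iff]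
    intro he
    exact absurd (he ▸ List.take_prefix xm.length (a :: ts)) h

-- the per-row count: A's range-fold equals B's suffix walk, for any initial accumulator
lemma row_count (xm : List String) (t : List String) (c0 : Int) :
    (List.range t.length).foldl (fun c k => if decide (xm <+: t.drop k) then c + 1 else c) c0
      = c0 + orizzTails xm t := by
  induction t generalizing c0 with
  | nil => simp [orizzTails]
  | cons a ts ih =>
    rw [List.length_cons, List.range_succ_eq_map, List.foldl_cons, List.foldl_map]
    simp only [List.drop_succ_cons, List.drop_zero]
    refine (ih _).trans ?_
    rw [orizzTails_cons]
    by_cases h : xm <+: (a :: ts)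
    · simp [h]; ring
    · simp [h]

-- A's fold over pyRange rewritten to the Nat range fold of row_count
lemma row_fold (xm : List String) (row : List String) (c0 : Int) :
    (PySem.List.pyRange 0 (row.length : Int) 1).foldl
      (fun c i => if orizzInner row i xm then c + 1 else c) c0
      = c0 + orizzTails xm row := by
  rw [PySem.List.pyRange_zero_natCast, List.foldl_map]
  rw [PySem.List.foldl_congr_mem (List.range row.length) _
      (fun c k => if decide (xm <+: row.drop k) then c + 1 else c) c0 ?_]
  · exact row_count xm row c0
  · intro c k _
    rw [orizzInner_eq_prefix row xm (k : Int) (by positivity)]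
    simp

-- ===== VERDICT (by name: the statement is the Claim_ definition above) =====
theorem orizz_spec : Claim_equal_orizz := by
  intro data xmas _
  unfold Spec_orizz orizz orizz_alt
  exact PySem.List.foldl_congr_mem data _ _ 0 (fun c row _ => row_fold xmas row c)
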